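-- pv_equiv track=rewrite | github.com/bilmontanha/taf_eb | funcoes.py | mencao_final_limpa
-- ===== SOURCE A (Python) =====
-- def mencao_final_limpa(dicio): #menção final sem os militares com erros de lançamento
--     dicio_copia = dicio.copy()#só para não alterar o dicionário original
--     resultado = dict()         #mencao_final_limpa(lista_mencoes(aba))
--     for k, v in dicio_copia.items():
--         if 'NR' in v:
--             resultado[k] = 'NR'
--             continue
--         if 'A' in v:
--             if 'I' in v:
--                 resultado[k] = 'I'
--                 continue
--             else:
--                 resultado[k] = 'R'
--                 continue
--         if 'I' in v:
--             resultado[k] = 'I'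
--             continue
--         if 'R' in v:
--             resultado[k] = 'R'
--             continue
--         if 'B' in v:
--             resultado[k] = 'B'
--             continue
--         if 'MB' in v:
--             resultado[k] = 'MB'
--             continue
--         if 'E' in v:
--             resultado[k] = 'E'
--             continue
--         if 'S' in v:
--             resultado[k] = 'S'
--     return resultado
-- ===== SOURCE B (Python) =====
-- _RANK = {'NR': 0, 'I': 1, 'A': 2, 'R': 2, 'B': 3, 'MB': 4, 'E': 5, 'S': 6}
-- _LABEL = ('NR', 'I', 'R', 'B', 'MB', 'E', 'S')
--
--
-- def mencao_final_limpa(dicio):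
--     resultado = {}
--     for k, v in dicio.items():
--         best = min((_RANK.get(x, len(_LABEL)) for x in v), default=len(_LABEL))
--         if best < len(_LABEL):
--             resultado[k] = _LABEL[best]
--     return resultado
-- ===== Notes on version B (the rewrite author's own statement) =====
-- stated objective: alternative
-- what changed: Replaces A's eight-branch if/continue priority chain by a numeric minimum: every mention in the list is mapped to a rank via a dict ('A' sharing rank 2 with 'R', correct since 'I' with rank 1 outranks it), and the key gets the label indexed by the minimal rank, or is skipped if nothing matched.
import Mathlib
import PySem

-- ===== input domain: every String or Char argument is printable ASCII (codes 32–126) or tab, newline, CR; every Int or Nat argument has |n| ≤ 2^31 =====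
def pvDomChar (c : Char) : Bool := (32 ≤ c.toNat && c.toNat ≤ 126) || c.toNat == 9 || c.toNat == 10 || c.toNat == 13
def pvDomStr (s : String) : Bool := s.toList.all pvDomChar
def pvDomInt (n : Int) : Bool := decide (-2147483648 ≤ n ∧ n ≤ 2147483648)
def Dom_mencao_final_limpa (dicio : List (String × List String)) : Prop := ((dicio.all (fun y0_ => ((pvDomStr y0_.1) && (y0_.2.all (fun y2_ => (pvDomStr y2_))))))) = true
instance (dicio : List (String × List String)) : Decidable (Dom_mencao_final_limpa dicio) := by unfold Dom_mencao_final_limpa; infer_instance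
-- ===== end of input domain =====

-- B replaces A's eight-branch if/continue priority chain by a numeric minimum: each mention is
-- mapped to a rank and the key gets the label of the minimal rank ('alternative'; same cost).

-- ===== PORT A =====
-- A's loop body: the if/continue chain, transliterated branch for branch.
def mencao_final_limpa (dicio : List (String × List String)) : List (String × String) :=
  (dicio.foldl (fun (resultado : PySem.Dict String String) kv =>
      let k := kv.1
      let v := kv.2
      if v.contains "NR" then resultado.insert k "NR"
      else if v.contains "A" then
        (if v.contains "I" then resultado.insert k "I" else resultado.insert k "R")
      else if v.contains "I" then resultado.insert k "I"
      else if v.contains "R" then resultado.insert k "R"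
      else if v.contains "B" then resultado.insert k "B"
      else if v.contains "MB" then resultado.insert k "MB"
      else if v.contains "E" then resultado.insert k "E"
      else if v.contains "S" then resultado.insert k "S"
      else resultado) PySem.Dict.empty).items

-- ===== PORT B =====
-- _RANK: rank of each mention ('A' and 'R' share rank 2).
def pvRankDict : PySem.Dict String Nat :=
  PySem.Dict.ofList [("NR", 0), ("I", 1), ("A", 2), ("R", 2), ("B", 3), ("MB", 4), ("E", 5), ("S", 6)]

-- _LABEL
def pvLabel : List String := ["NR", "I", "R", "B", "MB", "E", "S"]

-- min((_RANK.get(x, 7) for x in v), default=7): Python's min over the mapped list, ported as the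
-- running-min fold with initial 7 — exact here since every mapped value is ≤ 7, so the initial 7
-- plays Python's 'default=7'.
def pvBest (v : List String) : Nat :=
  v.foldl (fun m x => min m (pvRankDict.getD x pvLabel.length)) pvLabel.length

def mencao_final_limpa_alt (dicio : List (String × List String)) : List (String × String) :=
  (dicio.foldl (fun (resultado : PySem.Dict String String) kv =>
      let best := pvBest kv.2
      if best < pvLabel.length then resultado.insert kv.1 (pvLabel.getD best "")
      else resultado) PySem.Dict.empty).items

-- ===== PRECONDITION & SPEC =====
def Spec_mencao_final_limpa (dicio : List (String × List String)) (out : List (String × String)) : Prop := out = mencao_final_limpa_alt dicio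
instance (dicio : List (String × List String)) (out : List (String × String)) : Decidable (Spec_mencao_final_limpa dicio out) := by unfold Spec_mencao_final_limpa; infer_instance

-- ===== CLAIM (what is proved, stated in full; the proofs are below) =====
def Claim_equal_mencao_final_limpa : Prop := ∀ (dicio : List (String × List String)), Dom_mencao_final_limpa dicio → Spec_mencao_final_limpa dicio (mencao_final_limpa dicio)

-- ===== LEMMAS AND PROOFS =====

-- A's priority chain expressed as a rank (proof-side characterisation of pvBest).
def pvChain (v : List String) : Nat :=
  if "NR" ∈ v then 0
  else if "I" ∈ v then 1
  else if "A" ∈ v then 2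
  else if "R" ∈ v then 2
  else if "B" ∈ v then 3
  else if "MB" ∈ v then 4
  else if "E" ∈ v then 5
  else if "S" ∈ v then 6
  else 7

theorem pvChain_le (v : List String) : pvChain v ≤ 7 := by
  unfold pvChain; split_ifs <;> omega

set_option maxHeartbeats 1600000 in
theorem pvChain_cons (x : String) (v : List String) :
    min (pvRankDict.getD x pvLabel.length) (pvChain v) = pvChain (x :: v) := by
  by_cases h1 : x = "NR"
  · subst h1; rw [show pvRankDict.getD "NR" pvLabel.length = 0 from by decide]
    simp only [pvChain, List.mem_cons]; simp
  by_cases h2 : x = "I"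
  · subst h2; rw [show pvRankDict.getD "I" pvLabel.length = 1 from by decide]
    simp only [pvChain, List.mem_cons]; simp
    try split_ifs <;> omega
  by_cases h3 : x = "A"
  · subst h3; rw [show pvRankDict.getD "A" pvLabel.length = 2 from by decide]
    simp only [pvChain, List.mem_cons]; simp
    try split_ifs <;> omega
  by_cases h4 : x = "R"
  · subst h4; rw [show pvRankDict.getD "R" pvLabel.length = 2 from by decide]
    simp only [pvChain, List.mem_cons]; simp
    try split_ifs <;> omega
  by_cases h5 : x = "B"
  · subst h5; rw [show pvRankDict.getD "B" pvLabel.length = 3 from by decide]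
    simp only [pvChain, List.mem_cons]; simp
    try split_ifs <;> omega
  by_cases h6 : x = "MB"
  · subst h6; rw [show pvRankDict.getD "MB" pvLabel.length = 4 from by decide]
    simp only [pvChain, List.mem_cons]; simp
    try split_ifs <;> omega
  by_cases h7 : x = "E"
  · subst h7; rw [show pvRankDict.getD "E" pvLabel.length = 5 from by decide]
    simp only [pvChain, List.mem_cons]; simp
    try split_ifs <;> omega
  by_cases h8 : x = "S"
  · subst h8; rw [show pvRankDict.getD "S" pvLabel.length = 6 from by decide]
    simp only [pvChain, List.mem_cons]; simp
    try split_ifs <;> omega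
  · have hr : pvRankDict.getD x pvLabel.length = 7 := by
      have hm : pvRankDict = PySem.Dict.mk [("NR", 0), ("I", 1), ("A", 2), ("R", 2), ("B", 3), ("MB", 4), ("E", 5), ("S", 6)] := by decide
      rw [hm]
      simp [PySem.Dict.getD_eq_get?_getD, PySem.Dict.get?, pvLabel,
        Ne.symm h1, Ne.symm h2, Ne.symm h3, Ne.symm h4, Ne.symm h5, Ne.symm h6, Ne.symm h7, Ne.symm h8]
    have hc : pvChain (x :: v) = pvChain v := by
      simp only [pvChain, List.mem_cons]
      simp [Ne.symm h1, Ne.symm h2, Ne.symm h3, Ne.symm h4, Ne.symm h5, Ne.symm h6,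
        Ne.symm h7, Ne.symm h8]
    rw [hr, hc]
    have := pvChain_le v
    omega

theorem pvBest_aux (v : List String) : ∀ a, a ≤ 7 →
    v.foldl (fun m x => min m (pvRankDict.getD x pvLabel.length)) a = min a (pvChain v) := by
  induction v with
  | nil => intro a ha; simp only [List.foldl_nil, pvChain]; simp; omega
  | cons x t ih =>
      intro a ha
      simp only [List.foldl_cons]
      rw [ih _ (by omega), ← pvChain_cons x t]
      omega

theorem pvBest_eq (v : List String) : pvBest v = pvChain v := by
  have h := pvBest_aux v 7 (le_refl 7)
  have := pvChain_le v
  unfold pvBest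
  rw [show pvLabel.length = 7 from rfl] at h ⊢
  rw [h]
  omega

-- Per-entry agreement: A's branch chain equals B's rank-minimum step.
set_option maxHeartbeats 1600000 in
theorem pv_step_eq (resultado : PySem.Dict String String) (k : String) (v : List String) :
    (if v.contains "NR" then resultado.insert k "NR"
      else if v.contains "A" then
        (if v.contains "I" then resultado.insert k "I" else resultado.insert k "R")
      else if v.contains "I" then resultado.insert k "I"
      else if v.contains "R" then resultado.insert k "R"
      else if v.contains "B" then resultado.insert k "B"
      else if v.contains "MB" then resultado.insert k "MB"
      else if v.contains "E" then resultado.insert k "E"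
      else if v.contains "S" then resultado.insert k "S"
      else resultado)
    = (if pvBest v < pvLabel.length then resultado.insert k (pvLabel.getD (pvBest v) "")
       else resultado) := by
  rw [pvBest_eq, show pvLabel.length = 7 from by decide]
  simp only [List.contains_eq_mem, decide_eq_true_eq, pvChain]
  split_ifs <;> simp_all [pvLabel]

theorem mencao_final_limpa_eq (dicio : List (String × List String)) :
    mencao_final_limpa dicio = mencao_final_limpa_alt dicio := by
  unfold mencao_final_limpa mencao_final_limpa_alt
  have h : (fun (resultado : PySem.Dict String String) (kv : String × List String) =>
      let best := pvBest kv.2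
      if best < pvLabel.length then resultado.insert kv.1 (pvLabel.getD best "")
      else resultado) =
      (fun (resultado : PySem.Dict String String) (kv : String × List String) =>
        if kv.2.contains "NR" then resultado.insert kv.1 "NR"
        else if kv.2.contains "A" then
          (if kv.2.contains "I" then resultado.insert kv.1 "I" else resultado.insert kv.1 "R")
        else if kv.2.contains "I" then resultado.insert kv.1 "I"
        else if kv.2.contains "R" then resultado.insert kv.1 "R"
        else if kv.2.contains "B" then resultado.insert kv.1 "B"
        else if kv.2.contains "MB" then resultado.insert kv.1 "MB"
        else if kv.2.contains "E" then resultado.insert kv.1 "E"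
        else if kv.2.contains "S" then resultado.insert kv.1 "S"
        else resultado) := by
    funext resultado kv
    exact (pv_step_eq resultado kv.1 kv.2).symm
  rw [h]

-- ===== VERDICT (by name: the statement is the Claim_ definition above) =====
theorem mencao_final_limpa_spec : Claim_equal_mencao_final_limpa := by
  intro dicio _
  exact mencao_final_limpa_eq dicio
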